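-- pv_equiv track=rewrite | github.com/DuongVu101498/codility-solutions | Sorting/Triangle.py | solution
-- ===== SOURCE A (Python) =====
-- def solution(A):
--     # Implement your solution here
--     slim_A = [ num for num in A if num > 0]
--     n=len(slim_A)
--     if n <3:
--         return 0
--     slim_A.sort()
--     for i in range(n-2):
--         if slim_A[i]+slim_A[i+1]>slim_A[i+2]:
--             return 1
--     return 0
-- ===== SOURCE B (Python) =====
-- def solution(A):
--     n = len(A)
--     for i in range(n):
--         for j in range(i + 1, n):
--             for k in range(j + 1, n):
--                 x, y, z = A[i], A[j], A[k]
--                 if x + y > z and y + z > x and x + z > y: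
--                     return 1
--     return 0
-- ===== Notes on version B (the rewrite author's own statement) =====
-- stated objective: alternative
-- what changed: Replaces the filter-positives + sort + consecutive-triple scan with a direct exhaustive scan over all index triples i<j<k checking all three triangle inequalities (no filtering, no sorting).
import Mathlib
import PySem

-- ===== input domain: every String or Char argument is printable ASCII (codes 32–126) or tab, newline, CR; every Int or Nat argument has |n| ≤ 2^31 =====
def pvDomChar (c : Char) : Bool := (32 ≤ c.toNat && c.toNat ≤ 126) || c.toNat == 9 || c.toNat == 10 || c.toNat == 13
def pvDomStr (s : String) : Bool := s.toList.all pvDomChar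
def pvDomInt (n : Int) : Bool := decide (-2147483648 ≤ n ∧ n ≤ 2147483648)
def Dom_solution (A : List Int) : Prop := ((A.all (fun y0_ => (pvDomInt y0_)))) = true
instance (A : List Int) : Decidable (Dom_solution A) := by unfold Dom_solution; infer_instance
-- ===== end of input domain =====

-- B replaces A's filter-positives + sort + consecutive-triple scan by a direct exhaustive scan
-- over all index triples i<j<k checking all three triangle inequalities (objective: alternative).

-- ===== PORT A =====
def solution (A : List Int) : Int :=
  let slim := A.filter (fun num => decide (num > 0))
  let n := slim.length
  if n < 3 then 0
  else
    let s := PySem.List.sorted slim (fun x => x)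
    -- the loop 'for i in range(n-2): if …: return 1' then 'return 0'
    if (List.range (n - 2)).any
        (fun i => decide (s.getD i 0 + s.getD (i+1) 0 > s.getD (i+2) 0))
    then 1 else 0

-- ===== PORT B =====
def solution_alt (A : List Int) : Int :=
  let n := A.length
  if (List.range n).any (fun i =>
      (List.range' (i+1) (n - (i+1))).any (fun j =>
        (List.range' (j+1) (n - (j+1))).any (fun k =>
          let x := A.getD i 0
          let y := A.getD j 0
          let z := A.getD k 0
          decide (x + y > z) && decide (y + z > x) && decide (x + z > y))))
  then 1 else 0

-- ===== PRECONDITION & SPEC =====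
def Spec_solution (A : List Int) (out : Int) : Prop := out = solution_alt A
instance (A : List Int) (out : Int) : Decidable (Spec_solution A out) := by unfold Spec_solution; infer_instance

-- ===== CLAIM (what is proved, stated in full; the proofs are below) =====
def Claim_equal_solution : Prop := ∀ (A : List Int), Dom_solution A → Spec_solution A (solution A)

-- ===== LEMMAS AND PROOFS =====

-- Tri x y z : the three values form a (non-degenerate) triangle
def Tri (x y z : Int) : Prop := x + y > z ∧ y + z > x ∧ x + z > y

-- a triangle triple has all sides positive
theorem Tri.pos {x y z : Int} (h : Tri x y z) : 0 < x ∧ 0 < y ∧ 0 < z := by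
  obtain ⟨h1, h2, h3⟩ := h; omega

-- Tri is invariant under permutation of the three values
theorem tri_perm {u v w x y z : Int} (h : List.Perm [u, v, w] [x, y, z])
    (ht : Tri x y z) : Tri u v w := by
  have hsum : u + (v + w) = x + (y + z) := by
    have := h.sum_eq; simpa using this
  have hu : u ∈ ([x, y, z] : List Int) := h.mem_iff.mp (by simp)
  have hv : v ∈ ([x, y, z] : List Int) := h.mem_iff.mp (by simp)
  have hw : w ∈ ([x, y, z] : List Int) := h.mem_iff.mp (by simp)
  simp only [List.mem_cons, List.not_mem_nil, or_false] at hu hv hw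
  obtain ⟨h1, h2, h3⟩ := ht
  unfold Tri
  rcases hu with rfl | rfl | rfl <;> rcases hv with rfl | rfl | rfl <;>
    rcases hw with rfl | rfl | rfl <;> omega

-- two elements at increasing indices form a sublist
theorem pair_sublist {α : Type} (l : List α) {j k : Nat} (hjk : j < k)
    (hk : k < l.length) : List.Sublist [l[j], l[k]] l := by
  have hj : j < l.length := lt_trans hjk hk
  have h1 : List.Sublist [l[j], l[k]] (l.drop j) := by
    rw [← List.getElem_cons_drop hj]
    refine List.Sublist.cons₂ _ ?_
    rw [List.singleton_sublist]
    have hk' : k - (j+1) < (l.drop (j+1)).length := by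
      simp [List.length_drop]; omega
    have : (l.drop (j+1))[k - (j+1)] = l[k] := by
      rw [List.getElem_drop]; congr 1; omega
    rw [← this]; exact List.getElem_mem hk'
  exact h1.trans (List.drop_sublist j l)

-- three elements at increasing indices form a sublist
theorem triple_sublist {α : Type} (l : List α) {i j k : Nat} (hij : i < j)
    (hjk : j < k) (hk : k < l.length) : List.Sublist [l[i], l[j], l[k]] l := by
  have hi : i < l.length := by omega
  have h1 : List.Sublist [l[i], l[j], l[k]] (l.drop i) := by
    rw [← List.getElem_cons_drop hi]
    refine List.Sublist.cons₂ _ ?_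
    have hk' : k - (i+1) < (l.drop (i+1)).length := by
      simp [List.length_drop]; omega
    have hjk' : j - (i+1) < k - (i+1) := by omega
    have e1 : (l.drop (i+1))[j - (i+1)] = l[j] := by
      rw [List.getElem_drop]; congr 1; omega
    have e2 : (l.drop (i+1))[k - (i+1)] = l[k] := by
      rw [List.getElem_drop]; congr 1; omega
    have := pair_sublist (l.drop (i+1)) hjk' hk'
    rwa [e1, e2] at this
  exact h1.trans (List.drop_sublist i l)

-- a 3-element sublist yields three strictly increasing indices
theorem indices_of_triple_sublist {l : List Int} {x y z : Int}
    (h : List.Sublist [x, y, z] l) :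
    ∃ p q r : Nat, p < q ∧ q < r ∧ r < l.length ∧
      l.getD p 0 = x ∧ l.getD q 0 = y ∧ l.getD r 0 = z := by
  obtain ⟨f, hf⟩ := List.sublist_iff_exists_fin_orderEmbedding_get_eq.mp h
  have hlen : ([x, y, z] : List Int).length = 3 := by simp
  have h01 : f ⟨0, by omega⟩ < f ⟨1, by omega⟩ := f.strictMono (by simp)
  have h12 : f ⟨1, by omega⟩ < f ⟨2, by omega⟩ := f.strictMono (by simp)
  refine ⟨(f ⟨0, by omega⟩).1, (f ⟨1, by omega⟩).1, (f ⟨2, by omega⟩).1,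
    h01, h12, (f ⟨2, by omega⟩).2, ?_, ?_, ?_⟩
  · rw [List.getD_eq_getElem l 0 (f ⟨0, by omega⟩).2]
    have := hf ⟨0, by omega⟩; simpa [List.get] using this.symm
  · rw [List.getD_eq_getElem l 0 (f ⟨1, by omega⟩).2]
    have := hf ⟨1, by omega⟩; simpa [List.get] using this.symm
  · rw [List.getD_eq_getElem l 0 (f ⟨2, by omega⟩).2]
    have := hf ⟨2, by omega⟩; simpa [List.get] using this.symm

-- HasTri A : some index triple i<j<k of A forms a triangle
def HasTri (A : List Int) : Prop :=
  ∃ i j k : Nat, i < j ∧ j < k ∧ k < A.length ∧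
    Tri (A.getD i 0) (A.getD j 0) (A.getD k 0)

-- HasTri in terms of 3-element sublists
theorem hasTri_iff_sublist (A : List Int) :
    HasTri A ↔ ∃ x y z : Int, List.Sublist [x, y, z] A ∧ Tri x y z := by
  constructor
  · rintro ⟨i, j, k, hij, hjk, hk, ht⟩
    have hi : i < A.length := by omega
    have hj : j < A.length := by omega
    refine ⟨A[i], A[j], A[k], triple_sublist A hij hjk hk, ?_⟩
    rwa [List.getD_eq_getElem A 0 hi, List.getD_eq_getElem A 0 hj,
      List.getD_eq_getElem A 0 hk] at ht
  · rintro ⟨x, y, z, hs, ht⟩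
    obtain ⟨p, q, r, hpq, hqr, hr, ex, ey, ez⟩ := indices_of_triple_sublist hs
    exact ⟨p, q, r, hpq, hqr, hr, by rw [ex, ey, ez]; exact ht⟩

-- subperm preserves the existence of a triangle sublist
theorem tri_sublist_of_subperm {B : List Int} {x y z : Int}
    (hsp : List.Subperm [x, y, z] B) (ht : Tri x y z) :
    ∃ u v w : Int, List.Sublist [u, v, w] B ∧ Tri u v w := by
  obtain ⟨l, hperm, hsub⟩ := hsp
  have hlen : l.length = 3 := by simpa using hperm.length_eq
  match l, hlen with
  | [u, v, w], _ =>
    exact ⟨u, v, w, hsub, tri_perm hperm ht⟩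

-- B's condition is exactly HasTri
theorem alt_cond_iff (A : List Int) :
    ((List.range A.length).any (fun i =>
      (List.range' (i+1) (A.length - (i+1))).any (fun j =>
        (List.range' (j+1) (A.length - (j+1))).any (fun k =>
          let x := A.getD i 0
          let y := A.getD j 0
          let z := A.getD k 0
          decide (x + y > z) && decide (y + z > x) && decide (x + z > y)))) = true)
    ↔ HasTri A := by
  simp only [List.any_eq_true, List.mem_range, List.mem_range'_1,
    Bool.and_eq_true, decide_eq_true_eq]
  constructor
  · rintro ⟨i, hi, j, ⟨hj1, hj2⟩, k, ⟨hk1, hk2⟩, ⟨⟨h1, h2⟩, h3⟩⟩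
    exact ⟨i, j, k, by omega, by omega, by omega, h1, h2, h3⟩
  · rintro ⟨i, j, k, hij, hjk, hk, h1, h2, h3⟩
    exact ⟨i, by omega, j, ⟨by omega, by omega⟩, k, ⟨by omega, by omega⟩, ⟨⟨h1, h2⟩, h3⟩⟩

-- the sorted list of positives
theorem sorted_stuff (A : List Int) :
    (PySem.List.sorted (A.filter (fun num => decide (num > 0))) (fun x => x)).Perm
      (A.filter (fun num => decide (num > 0))) ∧
    (PySem.List.sorted (A.filter (fun num => decide (num > 0))) (fun x => x)).Pairwise (· ≤ ·) := by
  exact ⟨PySem.List.sorted_perm _ _ _, by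
    have := PySem.List.sorted_pairwise (A.filter (fun num => decide (num > 0))) (fun x => x)
    simpa using this⟩

-- A's scan condition (with length ≥ 3) is exactly HasTri
theorem a_cond_iff (A : List Int) :
    (¬ (A.filter (fun num => decide (num > 0))).length < 3 ∧
     (List.range ((A.filter (fun num => decide (num > 0))).length - 2)).any
        (fun i =>
          decide ((PySem.List.sorted (A.filter (fun num => decide (num > 0))) (fun x => x)).getD i 0 +
            (PySem.List.sorted (A.filter (fun num => decide (num > 0))) (fun x => x)).getD (i+1) 0 >
            (PySem.List.sorted (A.filter (fun num => decide (num > 0))) (fun x => x)).getD (i+2) 0)) = true)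
    ↔ HasTri A := by
  set s := PySem.List.sorted (A.filter (fun num => decide (num > 0))) (fun x => x) with hs
  obtain ⟨hperm, hpw⟩ := sorted_stuff A
  rw [← hs] at hperm hpw
  have hlen : s.length = (A.filter (fun num => decide (num > 0))).length := hperm.length_eq
  have hmono : Monotone s.get := List.SortedLE.monotone_get (List.sortedLE_iff_pairwise.mpr hpw)
  have hposmem : ∀ w ∈ s, 0 < w := by
    intro w hw
    have : w ∈ A.filter (fun num => decide (num > 0)) := hperm.mem_iff.mp hw
    have := List.of_mem_filter this
    simpa using this
  rw [hasTri_iff_sublist]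
  simp only [List.any_eq_true, List.mem_range, decide_eq_true_eq]
  constructor
  · rintro ⟨hn, i, hi, hcond⟩
    have h2 : i + 2 < s.length := by omega
    have h1 : i + 1 < s.length := by omega
    have h0 : i < s.length := by omega
    rw [List.getD_eq_getElem s 0 h0, List.getD_eq_getElem s 0 h1,
      List.getD_eq_getElem s 0 h2] at hcond
    have hxy : s[i] ≤ s[i+1] := hmono (by simp [Fin.le_def] : (⟨i, h0⟩ : Fin s.length) ≤ ⟨i+1, h1⟩)
    have hyz : s[i+1] ≤ s[i+2] := hmono (by simp [Fin.le_def] : (⟨i+1, h1⟩ : Fin s.length) ≤ ⟨i+2, h2⟩)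
    have hpx : 0 < s[i] := hposmem _ (List.getElem_mem h0)
    have htri : Tri s[i] s[i+1] s[i+2] := ⟨hcond, by omega, by omega⟩
    have hsub : List.Sublist [s[i], s[i+1], s[i+2]] s :=
      triple_sublist s (by omega) (by omega) h2
    have hsubA : List.Subperm [s[i], s[i+1], s[i+2]] A := by
      have h1 : List.Subperm [s[i], s[i+1], s[i+2]] (A.filter (fun num => decide (num > 0))) :=
        hsub.subperm.trans hperm.subperm
      exact h1.trans
        (List.Sublist.subperm
          (List.filter_sublist : List.Sublist (A.filter (fun num => decide (num > 0))) A))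
    obtain ⟨u, v, w, husub, hutri⟩ := tri_sublist_of_subperm hsubA htri
    exact ⟨u, v, w, husub, hutri⟩
  · rintro ⟨x, y, z, hsub, htri⟩
    obtain ⟨hpx, hpy, hpz⟩ := htri.pos
    -- [x,y,z] survives the positivity filter
    have hsubf : List.Sublist [x, y, z] (A.filter (fun num => decide (num > 0))) := by
      have := hsub.filter (fun num => decide (num > 0))
      simpa [List.filter, hpx, hpy, hpz] using this
    have hsps : List.Subperm [x, y, z] s := hsubf.subperm.trans hperm.symm.subperm
    obtain ⟨a, b, c, hcsub, hctri⟩ := tri_sublist_of_subperm hsps htri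
    obtain ⟨p, q, r, hpq, hqr, hr, ea, eb, ec⟩ := indices_of_triple_sublist hcsub
    have hpw3 : ([a, b, c] : List Int).Pairwise (· ≤ ·) := hpw.sublist hcsub
    obtain ⟨hA1, hpw2⟩ := List.pairwise_cons.mp hpw3
    have hab : a ≤ b := hA1 b (by simp)
    have hbc : b ≤ c := (List.pairwise_cons.mp hpw2).1 c (by simp)
    have hn : ¬ (A.filter (fun num => decide (num > 0))).length < 3 := by omega
    refine ⟨hn, r - 2, by omega, ?_⟩
    have h0 : r - 2 < s.length := by omega
    have h1 : r - 2 + 1 < s.length := by omega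
    have h2 : r - 2 + 2 < s.length := by omega
    have hp : p < s.length := by omega
    have hq : q < s.length := by omega
    rw [List.getD_eq_getElem s 0 h0, List.getD_eq_getElem s 0 h1,
      List.getD_eq_getElem s 0 h2]
    have hga : s[p] ≤ s[r-2] :=
      hmono (show (⟨p, hp⟩ : Fin s.length) ≤ ⟨r-2, h0⟩ by simp [Fin.le_def]; omega)
    have hgb : s[q] ≤ s[r-2+1] :=
      hmono (show (⟨q, hq⟩ : Fin s.length) ≤ ⟨r-2+1, h1⟩ by simp [Fin.le_def]; omega)
    have hea : s[p] = a := by rw [← List.getD_eq_getElem s 0 hp]; exact ea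
    have heb : s[q] = b := by rw [← List.getD_eq_getElem s 0 hq]; exact eb
    have hec : s[r-2+2] = c := by
      rw [← List.getD_eq_getElem s 0 h2]
      rw [show r - 2 + 2 = r by omega]; exact ec
    have : a + b > c := hctri.1
    omega

-- ===== VERDICT (by name: the statement is the Claim_ definition above) =====
theorem solution_spec : Claim_equal_solution := by
  intro A _
  unfold Spec_solution solution solution_alt
  simp only []
  by_cases h : HasTri A
  · rw [if_neg, if_pos ((alt_cond_iff A).mpr h)]
    · rw [if_pos]
      exact ((a_cond_iff A).mpr h).2
    · exact ((a_cond_iff A).mpr h).1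
  · rw [if_neg ((fun hc => h ((alt_cond_iff A).mp hc)) : ¬ _)]
    by_cases hn : (A.filter (fun num => decide (num > 0))).length < 3
    · rw [if_pos hn]
    · rw [if_neg hn, if_neg]
      intro hc
      exact h ((a_cond_iff A).mp ⟨hn, hc⟩)
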